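-- pv_equiv track=rewrite | github.com/Hoo93/BOJ_Algorithm | 백준/Gold/5639. 이진 검색 트리/이진 검색 트리.py | preToPost
-- ===== SOURCE A (Python) =====
-- def preToPost(nums: list) -> list:
--     if len(nums) == 0:
--         return []
--     if len(nums) == 1:
--         return nums
--     root = nums[0]
--     idx = 1
--     while idx < len(nums):
--         if nums[idx] > root:
--             break
--         else:
--             idx += 1
--
--     left = preToPost(nums[1:idx])
--     right = preToPost(nums[idx:])
--
--     return left + right + [root]
-- ===== SOURCE B (Python) =====
-- def preToPost(nums: list) -> list:
--     # Single pass over the preorder with an index pointer and an upper bound per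
--     # subtree segment, driven by an explicit frame stack (no recursion, no slicing).
--     n = len(nums)
--     out = []
--     i = 0
--     stack = [("enter", None)]
--     while stack:
--         tag, val = stack.pop()
--         if tag == "emit":
--             out.append(val)
--         else:
--             bound = val
--             if i < n and (bound is None or nums[i] <= bound):
--                 root = nums[i]
--                 i += 1
--                 stack.append(("emit", root))
--                 stack.append(("enter", bound))
--                 stack.append(("enter", root))
--     return out
-- ===== Notes on version B (the rewrite author's own statement) =====
-- stated objective: faster
-- what changed: Replaced the recursive slice-copy-and-rescan splitting (find first element greater than root, slice the list, recurse on copies) by a single left-to-right pass with one index pointer and an upper bound that delimits each subtree's segment, appending to one shared output list.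
import Mathlib
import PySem

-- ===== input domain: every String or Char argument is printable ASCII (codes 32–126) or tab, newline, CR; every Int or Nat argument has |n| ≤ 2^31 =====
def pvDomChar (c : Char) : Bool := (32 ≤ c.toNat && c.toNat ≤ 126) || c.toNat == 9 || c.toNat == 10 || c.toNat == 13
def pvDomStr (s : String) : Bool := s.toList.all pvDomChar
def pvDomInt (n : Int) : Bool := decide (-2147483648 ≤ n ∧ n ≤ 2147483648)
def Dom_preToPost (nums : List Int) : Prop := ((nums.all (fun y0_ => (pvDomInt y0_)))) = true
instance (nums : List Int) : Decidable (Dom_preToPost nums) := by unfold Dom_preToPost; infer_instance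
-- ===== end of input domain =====

-- B re-implements A's slice-and-recurse preorder→postorder conversion as a single
-- pass with an index pointer and an upper bound (no slicing, no re-scanning).

-- ===== PORT A =====

-- the 'while idx < len(nums): if nums[idx] > root: break else: idx += 1' loop
def aScan (nums : List Int) (root : Int) (idx : Nat) : Nat :=
  if h : idx < nums.length then
    if nums[idx] > root then idx else aScan nums root (idx + 1)
  else idx
termination_by nums.length - idx

-- used by preToPost's decreasing_by: the scan never moves the index backwards
theorem aScan_ge (nums : List Int) (root : Int) (idx : Nat) : idx ≤ aScan nums root idx := by
  unfold aScan
  split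
  · split
    · exact le_refl _
    · exact le_trans (Nat.le_succ idx) (aScan_ge nums root (idx + 1))
  · exact le_refl _
termination_by nums.length - idx

-- root = nums[0] (guarded: length ≥ 2) and idx = the scan result are written inline
def preToPost (nums : List Int) : List Int :=
  if _h0 : nums.length = 0 then []
  else if _h1 : nums.length = 1 then nums
  else
    preToPost (PySem.List.slice nums (some ((1 : Nat) : Int))
        (some ((aScan nums nums.headI 1 : Nat) : Int)))                    -- nums[1:idx]
      ++ preToPost (PySem.List.slice nums (some ((aScan nums nums.headI 1 : Nat) : Int)) none)  -- nums[idx:]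
      ++ [nums.headI]
termination_by nums.length
decreasing_by
  · rw [PySem.List.slice_natCast]
    simp only [List.length_take, List.length_drop]
    omega
  · rw [PySem.List.slice_from_natCast]
    have := aScan_ge nums nums.headI 1
    simp only [List.length_drop]
    omega

-- ===== PORT B =====

-- explicit frame stack from Source B: ("enter", bound) / ("emit", root)
inductive BFrame
  | enter : Option Int → BFrame
  | emit : Int → BFrame

-- the 'while stack:' loop of Source B; state is (stack, index, out)
def bExec (nums : List Int) : List BFrame → Nat → List Int → List Int
  | [], _, out => out
  | BFrame.emit r :: rest, i, out => bExec nums rest i (out ++ [r])     -- out.append(val)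
  | BFrame.enter bound :: rest, i, out =>
    if h : i < nums.length then
      if bound.any (fun b => decide (b < nums[i])) then bExec nums rest i out   -- bound check fails
      else
        bExec nums (BFrame.enter nums[i] :: BFrame.enter bound :: BFrame.emit nums[i] :: rest)
          (i + 1) out
    else bExec nums rest i out                                          -- i >= n
termination_by stack i _ => 3 * (nums.length - i) + stack.length
decreasing_by
  all_goals (simp; try omega)

def preToPost_alt (nums : List Int) : List Int :=
  bExec nums [BFrame.enter none] 0 []

-- ===== PRECONDITION & SPEC =====
def Spec_preToPost (nums : List Int) (out : List Int) : Prop := out = preToPost_alt nums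
instance (nums : List Int) (out : List Int) : Decidable (Spec_preToPost nums out) := by unfold Spec_preToPost; infer_instance

-- ===== CLAIM (what is proved, stated in full; the proofs are below) =====
def Claim_equal_preToPost : Prop := ∀ (nums : List Int), Dom_preToPost nums → Spec_preToPost nums (preToPost nums)

-- ===== LEMMAS AND PROOFS =====

-- reference function: postorder of the tree whose left subtree comes from the maximal
-- prefix of values ≤ root (exactly A's split point)
def G : List Int → List Int
  | [] => []
  | x :: xs =>
    G (xs.takeWhile (fun a => decide (a ≤ x))) ++ G (xs.dropWhile (fun a => decide (a ≤ x))) ++ [x]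
termination_by l => l.length
decreasing_by
  · exact Nat.lt_succ_of_le (List.takeWhile_sublist _).length_le
  · exact Nat.lt_succ_of_le (List.dropWhile_sublist _).length_le

-- the segment of the remaining input a call of build(bound) consumes
def segb (bound : Option Int) (l : List Int) : List Int :=
  match bound with
  | none => l
  | some b => l.takeWhile (fun a => decide (a ≤ b))

theorem aScan_spec (nums : List Int) (root : Int) (idx : Nat) :
    aScan nums root idx = idx + ((nums.drop idx).takeWhile (fun a => decide (a ≤ root))).length := by
  unfold aScan
  split
  · rename_i h
    rw [List.drop_eq_getElem_cons h]
    split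
    · rename_i hgt
      rw [List.takeWhile_cons_of_neg (by simpa using hgt)]
      simp
    · rename_i hle
      rw [aScan_spec nums root (idx + 1), List.takeWhile_cons_of_pos (by simpa using hle)]
      simp only [List.length_cons]
      omega
  · rename_i h
    rw [List.drop_eq_nil_of_le (by omega)]
    simp
termination_by nums.length - idx

theorem take_len_takeWhile (p : Int → Bool) (l : List Int) :
    l.take (l.takeWhile p).length = l.takeWhile p := by
  induction l with
  | nil => rfl
  | cons a t ih =>
    by_cases h : p a = true
    · rw [List.takeWhile_cons_of_pos h]
      simpa using ih
    · rw [List.takeWhile_cons_of_neg (by simpa using h)]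
      simp

theorem drop_len_takeWhile (p : Int → Bool) (l : List Int) :
    l.drop (l.takeWhile p).length = l.dropWhile p := by
  induction l with
  | nil => rfl
  | cons a t ih =>
    by_cases h : p a = true
    · rw [List.takeWhile_cons_of_pos h, List.dropWhile_cons_of_pos h]
      simpa using ih
    · rw [List.takeWhile_cons_of_neg (by simpa using h), List.dropWhile_cons_of_neg (by simpa using h)]
      simp

-- splitting a takeWhile by a lower cut v ≤ b
theorem tw_split (b v : Int) (hvb : v ≤ b) (M : List Int) :
    M.takeWhile (fun a => decide (a ≤ b))
      = M.takeWhile (fun a => decide (a ≤ v))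
        ++ (M.dropWhile (fun a => decide (a ≤ v))).takeWhile (fun a => decide (a ≤ b)) := by
  induction M with
  | nil => rfl
  | cons a t ih =>
    by_cases h : a ≤ v
    · rw [List.takeWhile_cons_of_pos (p := fun a => decide (a ≤ b)) (by simp; omega),
        List.takeWhile_cons_of_pos (p := fun a => decide (a ≤ v)) (by simpa using h),
        List.dropWhile_cons_of_pos (p := fun a => decide (a ≤ v)) (by simpa using h),
        List.cons_append, ih]
    · rw [List.takeWhile_cons_of_neg (p := fun a => decide (a ≤ v)) (by simpa using h),
        List.dropWhile_cons_of_neg (p := fun a => decide (a ≤ v)) (by simpa using h)]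
      simp

theorem tw_nil_of_head (v : Int) (l : List Int) (h : ∀ a ∈ l.head?, ¬ a ≤ v) :
    l.takeWhile (fun a => decide (a ≤ v)) = [] := by
  cases l with
  | nil => rfl
  | cons a t => rw [List.takeWhile_cons_of_neg (by simpa using h a (by simp))]

theorem dw_self_of_head (v : Int) (l : List Int) (h : ∀ a ∈ l.head?, ¬ a ≤ v) :
    l.dropWhile (fun a => decide (a ≤ v)) = l := by
  cases l with
  | nil => rfl
  | cons a t => rw [List.dropWhile_cons_of_neg (by simpa using h a (by simp))]

theorem head_dw (v : Int) (M : List Int) :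
    ∀ a ∈ (M.dropWhile (fun a => decide (a ≤ v))).head?, ¬ a ≤ v := by
  intro a ha
  have := List.head?_dropWhile_not (fun a : Int => decide (a ≤ v)) M
  cases hR : (M.dropWhile (fun a : Int => decide (a ≤ v))).head? with
  | none => rw [hR] at ha; cases ha
  | some b =>
    rw [hR] at ha this
    simp at ha this
    omega

theorem head_tw (q : Int → Bool) (l : List Int) :
    ∀ a ∈ (l.takeWhile q).head?, a ∈ l.head? := by
  intro a ha
  cases l with
  | nil => simp at ha
  | cons b t =>
    by_cases h : q b = true
    · rw [List.takeWhile_cons_of_pos h] at ha; simpa using ha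
    · rw [List.takeWhile_cons_of_neg (by simpa using h)] at ha; cases ha

theorem bExec_enter (nums : List Int) (bound : Option Int) (rest : List BFrame) (i : Nat) (out : List Int) :
    bExec nums (BFrame.enter bound :: rest) i out
      = bExec nums rest (i + (segb bound (nums.drop i)).length)
          (out ++ G (segb bound (nums.drop i))) := by
  rw [bExec]
  split
  · -- i < nums.length
    rename_i hi
    obtain ⟨v, hvi⟩ : ∃ v, nums[i] = v := ⟨_, rfl⟩
    rw [hvi]
    have hdrop : nums.drop i = v :: nums.drop (i + 1) := by
      rw [List.drop_eq_getElem_cons hi, hvi]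
    split
    · -- bound is some b with b < nums[i]: this segment is empty
      rename_i hcond
      cases bound with
      | none => simp at hcond
      | some b =>
        simp only [Option.any_some, decide_eq_true_eq] at hcond
        simp only [segb]
        rw [hdrop, List.takeWhile_cons_of_neg (by simp; omega)]
        simp [G]
    · -- nums[i] fits the bound: descend
      rename_i hcond
      have hfit : ∀ b, bound = some b → v ≤ b := by
        intro b hbnd
        rw [hbnd] at hcond
        simp only [Option.any_some, decide_eq_true_eq] at hcond
        omega
      have hlen2 : ((nums.drop (i+1)).takeWhile (fun a => decide (a ≤ v))).length
          + ((nums.drop (i+1)).dropWhile (fun a => decide (a ≤ v))).length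
          = (nums.drop (i+1)).length := by
        conv_rhs => rw [← List.takeWhile_append_dropWhile (p := fun a : Int => decide (a ≤ v))
          (l := nums.drop (i+1))]
        rw [List.length_append]
      have hLmem : ∀ x ∈ (nums.drop (i+1)).takeWhile (fun a => decide (a ≤ v)), x ≤ v :=
        fun x hx => by simpa using List.mem_takeWhile_imp hx
      have hLlen : ((nums.drop (i+1)).takeWhile (fun a => decide (a ≤ v))).length
          ≤ nums.length - (i+1) := by
        have := (List.takeWhile_sublist (l := nums.drop (i+1)) (fun a => decide (a ≤ v))).length_le
        simpa using this
      have hdrop2 : nums.drop (i + 1 + ((nums.drop (i+1)).takeWhile (fun a => decide (a ≤ v))).length)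
          = (nums.drop (i+1)).dropWhile (fun a => decide (a ≤ v)) := by
        rw [← List.drop_drop, drop_len_takeWhile]
      rw [bExec_enter nums (some v) (BFrame.enter bound :: BFrame.emit v :: rest) (i + 1) out]
      rw [bExec_enter nums bound (BFrame.emit v :: rest) _ _]
      rw [bExec]
      cases bound with
      | none =>
        simp only [segb]
        rw [hdrop2]
        congr 1
        · simp only [hdrop, List.length_cons]
          omega
        · rw [hdrop]
          conv_rhs => rw [G]
          simp [List.append_assoc]
      | some b =>
        have hvb : v ≤ b := hfit b rfl
        have hseg : (nums.drop i).takeWhile (fun a => decide (a ≤ b))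
            = v :: ((nums.drop (i+1)).takeWhile (fun a => decide (a ≤ v))
                ++ ((nums.drop (i+1)).dropWhile (fun a => decide (a ≤ v))).takeWhile
                    (fun a => decide (a ≤ b))) := by
          rw [hdrop, List.takeWhile_cons_of_pos (by simp; omega), tw_split b v (by omega)]
        have hR' : ∀ a ∈ (((nums.drop (i+1)).dropWhile (fun a => decide (a ≤ v))).takeWhile
            (fun a => decide (a ≤ b))).head?, ¬ a ≤ v := by
          intro a ha
          exact head_dw v (nums.drop (i+1)) a (head_tw _ _ a ha)
        simp only [segb]
        rw [hdrop2]
        congr 1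
        · rw [hseg]
          simp only [List.length_cons, List.length_append]
          omega
        · rw [hseg]
          conv_rhs => rw [G]
          rw [List.takeWhile_append_of_pos (by intro a ha; simpa using hLmem a ha),
            List.dropWhile_append_of_pos (by intro a ha; simpa using hLmem a ha),
            tw_nil_of_head v _ hR', dw_self_of_head v _ hR']
          simp [List.append_assoc]
  · -- i >= n: nothing left, empty segment
    rename_i hlen
    rw [List.drop_eq_nil_of_le (by omega)]
    cases bound <;> simp [segb, G]
termination_by 3 * (nums.length - i) + rest.length
decreasing_by
  all_goals (simp; try omega)

theorem A_eq_G (nums : List Int) : preToPost nums = G nums := by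
  cases nums with
  | nil => rw [preToPost]; simp [G]
  | cons x xs =>
    cases xs with
    | nil => rw [preToPost]; simp [G]
    | cons y ys =>
      rw [preToPost]
      rw [dif_neg (by simp), dif_neg (by simp)]
      have hhead : (x :: y :: ys).headI = x := rfl
      have hidx : aScan (x :: y :: ys) x 1
          = 1 + ((y :: ys).takeWhile (fun a => decide (a ≤ x))).length := by
        rw [aScan_spec]; rfl
      have hs1 : PySem.List.slice (x :: y :: ys) (some ((1 : Nat) : Int))
          (some ((1 + ((y :: ys).takeWhile (fun a => decide (a ≤ x))).length : Nat) : Int))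
          = (y :: ys).takeWhile (fun a => decide (a ≤ x)) := by
        rw [PySem.List.slice_natCast]
        simp only [List.drop_one, List.tail_cons, Nat.add_sub_cancel_left]
        exact take_len_takeWhile _ _
      have hs2 : PySem.List.slice (x :: y :: ys)
          (some ((1 + ((y :: ys).takeWhile (fun a => decide (a ≤ x))).length : Nat) : Int)) none
          = (y :: ys).dropWhile (fun a => decide (a ≤ x)) := by
        rw [PySem.List.slice_from_natCast, Nat.add_comm 1 _, List.drop_succ_cons]
        exact drop_len_takeWhile _ _
      rw [hhead, hidx, hs1, hs2]
      rw [A_eq_G ((y :: ys).takeWhile (fun a => decide (a ≤ x))),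
        A_eq_G ((y :: ys).dropWhile (fun a => decide (a ≤ x)))]
      conv_rhs => rw [G]
termination_by nums.length
decreasing_by
  · have := (List.takeWhile_sublist (l := y :: ys) (fun a => decide (a ≤ x))).length_le
    simp only [List.length_cons] at *
    omega
  · have := (List.dropWhile_sublist (l := y :: ys) (fun a => decide (a ≤ x))).length_le
    simp only [List.length_cons] at *
    omega

theorem B_eq_G (nums : List Int) : preToPost_alt nums = G nums := by
  rw [preToPost_alt, bExec_enter, bExec]
  simp [segb]

-- ===== VERDICT (by name: the statement is the Claim_ definition above) =====
theorem preToPost_spec : Claim_equal_preToPost := by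
  intro nums _
  unfold Spec_preToPost
  rw [A_eq_G, B_eq_G]
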